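-- pv_equiv track=rewrite | github.com/SDET-SOLOMAN/code_wars_python | kata_6s/pair_wise.py | pairwise2
-- ===== SOURCE A (Python) =====
-- def pairwise2(arr, n):
--     c = []
--
--     for i, char in enumerate(arr[:-1]):
--         for j, char2 in enumerate(arr[i + 1:], start=i + 1):
--             if i in c or j in c:
--                 continue
--             if char + char2 == n:
--                 c.append(i)
--                 c.append(j)
--     return sum(c)
-- ===== SOURCE B (Python) =====
-- def pairwise2(arr, n):
--     # Index the positions of each value once, then for each left index i
--     # take the first unused partner j > i from the candidate list for n - arr[i].
--     pos = {}
--     for idx, v in enumerate(arr):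
--         pos.setdefault(v, []).append(idx)
--     used = set()
--     total = 0
--     for i in range(len(arr) - 1):
--         if i in used:
--             continue
--         for j in pos.get(n - arr[i], ()):
--             if j > i and j not in used:
--                 used.add(i)
--                 used.add(j)
--                 total += i + j
--                 break
--     return total
-- ===== Notes on version B (the rewrite author's own statement) =====
-- stated objective: faster
-- what changed: Replaces the O(n^2) index-pair double scan with an O(n)-membership list c inside (O(n^3) total) by a value->positions hash index built in one pass plus an O(1)-membership used set, so each left index only scans the candidate positions of its complement value.
import Mathlib
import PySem

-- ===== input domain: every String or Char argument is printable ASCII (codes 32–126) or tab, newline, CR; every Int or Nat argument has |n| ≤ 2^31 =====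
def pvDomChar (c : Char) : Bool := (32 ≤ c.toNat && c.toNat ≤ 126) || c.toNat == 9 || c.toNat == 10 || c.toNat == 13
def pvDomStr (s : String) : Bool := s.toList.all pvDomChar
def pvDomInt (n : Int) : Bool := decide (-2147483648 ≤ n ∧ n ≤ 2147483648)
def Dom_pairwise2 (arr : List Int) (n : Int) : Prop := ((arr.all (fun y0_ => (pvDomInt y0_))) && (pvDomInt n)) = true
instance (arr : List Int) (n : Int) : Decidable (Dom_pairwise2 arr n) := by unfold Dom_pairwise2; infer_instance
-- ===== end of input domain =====

-- B builds a value→positions index once and keeps a used set, avoiding A's quadratic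
-- index-pair scan with linear membership tests (objective: faster).

-- ===== PORT A =====
def pairwise2 (arr : List Int) (n : Int) : Int :=
  let c : List Int :=
    (PySem.List.enumerate (PySem.List.slice arr none (some (-1))) 0).foldl
      (fun c p =>
        (PySem.List.enumerate (PySem.List.slice arr (some (p.1 + 1)) none) (p.1 + 1)).foldl
          (fun c q =>
            if c.contains p.1 || c.contains q.1 then c
            else if p.2 + q.2 == n then c ++ [p.1, q.1] else c) c) []
  c.sum

-- ===== PORT B =====
-- the for-with-break over the candidate list: first j with j > i that is not used
def pvFindJ (i : Int) (used : PySem.Set Int) : List Int → Option Int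
  | [] => none
  | j :: rest => if decide (i < j) && !(PySem.Set.contains used j) then some j else pvFindJ i used rest

def pairwise2_alt (arr : List Int) (n : Int) : Int :=
  let pos : PySem.Dict Int (List Int) :=
    (PySem.List.enumerate arr 0).foldl (fun d p => d.modify p.2 [] (· ++ [p.1])) PySem.Dict.empty
  let st :=
    (PySem.List.pyRange 0 ((arr.length : Int) - 1) 1).foldl
      (fun (st : PySem.Set Int × Int) i =>
        if PySem.Set.contains st.1 i then st
        else
          match pvFindJ i st.1 (pos.getD (n - PySem.List.pyGetD arr i 0) []) with
          | some j => (PySem.Set.add (PySem.Set.add st.1 i) j, st.2 + i + j)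
          | none => st)
      (PySem.Set.empty, 0)
  st.2

-- ===== PRECONDITION & SPEC =====
def Spec_pairwise2 (arr : List Int) (n : Int) (out : Int) : Prop := out = pairwise2_alt arr n
instance (arr : List Int) (n : Int) (out : Int) : Decidable (Spec_pairwise2 arr n out) := by unfold Spec_pairwise2; infer_instance

-- ===== CLAIM (what is proved, stated in full; the proofs are below) =====
def Claim_equal_pairwise2 : Prop := ∀ (arr : List Int) (n : Int), Dom_pairwise2 arr n → Spec_pairwise2 arr n (pairwise2 arr n)

-- ===== LEMMAS AND PROOFS =====

-- The canonical A-side step: for an unused left index i, pair it with the first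
-- index j > i whose value complements arr[i] and which is not used yet.
def pvPredA (arr : List Int) (n i : Int) (c : List Int) (j : Int) : Bool :=
  !c.contains j && (PySem.List.pyGetD arr i 0 + PySem.List.pyGetD arr j 0 == n)

def pvFindA (arr : List Int) (n : Int) (c : List Int) (i : Int) : Option Int :=
  (PySem.List.pyRange (i+1) (arr.length : Int)).find? (pvPredA arr n i c)

def pvStepA (arr : List Int) (n : Int) (c : List Int) (i : Int) : List Int :=
  if c.contains i then c
  else match pvFindA arr n c i with
    | some j => c ++ [i, j]
    | none => c

def pvPos (arr : List Int) : PySem.Dict Int (List Int) :=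
  (PySem.List.enumerate arr 0).foldl (fun d p => d.modify p.2 [] (· ++ [p.1])) PySem.Dict.empty

def pvStepB (arr : List Int) (n : Int) (st : PySem.Set Int × Int) (i : Int) : PySem.Set Int × Int :=
  if PySem.Set.contains st.1 i then st
  else
    match pvFindJ i st.1 ((pvPos arr).getD (n - PySem.List.pyGetD arr i 0) []) with
    | some j => (PySem.Set.add (PySem.Set.add st.1 i) j, st.2 + i + j)
    | none => st

-- find? is invariant under a pointwise-equal predicate on the list's members
lemma pvFind?_congr {a : Type} (l : List a) (p q : a -> Bool)
    (h : forall x, x ∈ l -> p x = q x) : l.find? p = l.find? q := by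
  induction l with
  | nil => rfl
  | cons x t ih =>
    rw [List.find?_cons, List.find?_cons, h x (by simp)]
    cases q x
    · exact ih (fun y hy => h y (by simp [hy]))
    · rfl

lemma pvFindJ_eq (i : Int) (used : PySem.Set Int) (l : List Int) :
    pvFindJ i used l = l.find? (fun j => decide (i < j) && !(PySem.Set.contains used j)) := by
  induction l with
  | nil => rfl
  | cons j t ih =>
    rw [pvFindJ, List.find?_cons]
    cases h : (decide (i < j) && !(PySem.Set.contains used j)) <;> simp [ih]

lemma pvPosD (arr : List Int) (v : Int) :
    (pvPos arr).getD v [] =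
      (PySem.List.pyRange 0 (arr.length : Int)).filter
        (fun j => PySem.List.pyGetD arr j 0 == v) := by
  have h1 : (PySem.List.enumerate arr 0).foldl
        (fun d p => d.modify p.2 [] (· ++ [p.1])) PySem.Dict.empty
      = ((PySem.List.enumerate arr 0).map Prod.swap).foldl
        (fun d p => d.modify p.1 [] (· ++ [p.2])) PySem.Dict.empty := by
    rw [List.foldl_map]
    rfl
  rw [pvPos, h1, PySem.Dict.getD_foldl_modify_append]
  rw [PySem.List.enumerate_eq_map_pyRange arr 0]
  simp [List.filter_map, List.map_map, Function.comp_def, PySem.Dict.getD_empty]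

lemma pvEnumDrop (arr : List Int) (k : Nat) :
    PySem.List.enumerate (arr.drop k) (k : Int) =
      (PySem.List.pyRange (k : Int) (arr.length : Int)).map
        (fun j => (j, PySem.List.pyGetD arr j 0)) := by
  apply List.ext_getElem
  · simp only [PySem.List.length_enumerate, List.length_drop, List.length_map,
      PySem.List.length_pyRange_one]
    omega
  · intro m h1 h2
    have hm : m < (arr.drop k).length := by
      simpa [PySem.List.length_enumerate] using h1
    have hlt : k + m < arr.length := by simp at hm; omega
    have e1 : (PySem.List.enumerate (List.drop k arr) (k : Int))[m] = ((k:Int) + m, arr[k + m]) := by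
      rw [PySem.List.getElem_enumerate _ _ _ (by simpa [PySem.List.length_enumerate] using h1)]
      congr 1
      exact List.getElem_drop ..
    rw [e1, List.getElem_map, PySem.List.getElem_pyRange_one]
    have e2 : PySem.List.pyGetD arr ((k:Int) + m) 0 = arr[k + m] := by
      rw [PySem.List.pyGetD_eq_getElem _ _ (by positivity) (by omega)]
      simp only [show (((k:Int) + m)).toNat = k + m by omega]
    rw [e2]

lemma pvInnerSkip (n i ch : Int) (l : List (Int × Int)) (c : List Int)
    (h : c.contains i = true) :
    l.foldl (fun c q => if c.contains i || c.contains q.1 then c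
                        else if ch + q.2 == n then c ++ [i, q.1] else c) c = c := by
  induction l with
  | nil => rfl
  | cons q t ih => simp only [List.foldl_cons, h, Bool.true_or, if_true]; exact ih

lemma pvInnerChar (n i ch : Int) (l : List (Int × Int)) (c : List Int)
    (h : c.contains i = false) :
    l.foldl (fun c q => if c.contains i || c.contains q.1 then c
                        else if ch + q.2 == n then c ++ [i, q.1] else c) c =
      (match l.find? (fun q => !c.contains q.1 && (ch + q.2 == n)) with
       | some q => c ++ [i, q.1]
       | none => c) := by
  induction l with
  | nil => rfl
  | cons q t ih =>
    rw [List.foldl_cons, List.find?_cons]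
    by_cases hc : c.contains q.1 = true
    · simp only [h, hc, Bool.false_or, if_true, Bool.not_true, Bool.false_and]
      exact ih
    · replace hc : c.contains q.1 = false := by simpa using hc
      by_cases he : (ch + q.2 == n) = true
      · simp only [h, hc, he, Bool.false_or, if_true, Bool.not_false, Bool.true_and]
        exact pvInnerSkip n i ch t (c ++ [i, q.1]) (by simp)
      · replace he : (ch + q.2 == n) = false := by simpa using he
        simp only [h, hc, he, Bool.false_or, Bool.not_false, Bool.true_and]
        exact ih

lemma pvFind_eq (arr : List Int) (n i : Int) (c : List Int) (used : PySem.Set Int)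
    (h0 : 0 ≤ i) (h1 : i < (arr.length : Int))
    (hmem : ∀ x : Int, used.contains x = c.contains x) :
    pvFindJ i used ((pvPos arr).getD (n - PySem.List.pyGetD arr i 0) []) =
      pvFindA arr n c i := by
  rw [pvFindJ_eq, pvPosD, List.find?_filter]
  rw [PySem.List.pyRange_one_append 0 (i+1) (arr.length : Int) (by omega) (by omega)]
  rw [List.find?_append]
  have hnone : (PySem.List.pyRange 0 (i+1)).find?
      (fun a => decide ((PySem.List.pyGetD arr a 0 == n - PySem.List.pyGetD arr i 0) = true ∧
        (decide (i < a) && !PySem.Set.contains used a) = true)) = none := by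
    rw [List.find?_eq_none]
    intro x hx
    have hx' := PySem.List.mem_pyRange_one.mp hx
    simp only [decide_eq_true_eq, Bool.and_eq_true, decide_eq_true_eq, not_and]
    intro _ hand
    omega
  rw [hnone, Option.none_or, pvFindA]
  apply pvFind?_congr
  intro j hj
  have hij := (PySem.List.mem_pyRange_one.mp hj).1
  have h2 : decide (i < j) = true := by simp; omega
  rw [pvPredA]
  rw [Bool.eq_iff_iff]
  simp only [decide_eq_true_eq, Bool.and_eq_true, Bool.not_eq_true', h2, true_and,
    beq_iff_eq, hmem j]
  constructor
  · rintro ⟨hv, hu⟩; exact ⟨by simpa using hu, by omega⟩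
  · rintro ⟨hu, hv⟩; exact ⟨by omega, by simpa using hu⟩

lemma pvStepA_eq (arr : List Int) (n i : Int) (c : List Int) :
    ((PySem.List.pyRange (i+1) (arr.length : Int)).map
        (fun j => (j, PySem.List.pyGetD arr j 0))).foldl
      (fun c q => if c.contains i || c.contains q.1 then c
                  else if PySem.List.pyGetD arr i 0 + q.2 == n then c ++ [i, q.1] else c) c
      = pvStepA arr n c i := by
  by_cases hci : c.contains i = true
  · rw [pvInnerSkip n i _ _ c hci, pvStepA, if_pos hci]
  · replace hci : c.contains i = false := by simpa using hci
    rw [pvInnerChar n i _ _ c hci, pvStepA, if_neg (by simp only [hci]; simp)]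
    rw [List.find?_map, pvFindA]
    have : ((fun q : Int × Int => !c.contains q.1 && (PySem.List.pyGetD arr i 0 + q.2 == n)) ∘
        (fun j => (j, PySem.List.pyGetD arr j 0))) = pvPredA arr n i c := by
      funext j; rfl
    rw [this]
    cases hf : (PySem.List.pyRange (i+1) (arr.length : Int)).find? (pvPredA arr n i c) <;> simp

lemma pvA_eq (arr : List Int) (n : Int) :
    pairwise2 arr n =
      ((PySem.List.pyRange 0 ((arr.length : Int) - 1)).foldl (pvStepA arr n) []).sum := by
  rw [pairwise2]
  rw [PySem.List.slice_to_neg_one]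
  rw [PySem.List.enumerate_eq_map_pyRange arr.dropLast 0]
  rw [List.foldl_map]
  have hr : PySem.List.pyRange 0 (PySem.List.len arr.dropLast) =
      PySem.List.pyRange 0 ((arr.length : Int) - 1) := by
    cases arr with
    | nil =>
      rw [PySem.List.pyRange_one_eq_nil (by simp [PySem.List.len]),
        PySem.List.pyRange_one_eq_nil (by simp)]
    | cons a t =>
      congr 1
      simp [PySem.List.len, List.length_dropLast]
  rw [hr]
  congr 1
  apply PySem.List.foldl_congr_mem
  intro c i hi
  have hi' := PySem.List.mem_pyRange_one.mp hi
  have hget : PySem.List.pyGetD arr.dropLast i 0 = PySem.List.pyGetD arr i 0 := by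
    rw [PySem.List.pyGetD_eq_getElem _ _ hi'.1 (by simp [List.length_dropLast]; omega),
      PySem.List.pyGetD_eq_getElem _ _ hi'.1 (by omega)]
    exact List.getElem_dropLast ..
  simp only [hget]
  rw [PySem.List.slice_from arr (by omega : (0:Int) ≤ i + 1)]
  have htn : (((i+1).toNat : Nat) : Int) = i + 1 := Int.toNat_of_nonneg (by omega)
  rw [show PySem.List.enumerate (List.drop (i+1).toNat arr) (i+1)
      = PySem.List.enumerate (List.drop (i+1).toNat arr) (((i+1).toNat : Nat) : Int) by rw [htn]]
  rw [pvEnumDrop arr (i+1).toNat, htn]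
  exact pvStepA_eq arr n i c

lemma pvContains_add (s : PySem.Set Int) (a x : Int) :
    List.contains (PySem.Set.add s a) x = (List.contains s x || x == a) := by
  rw [Bool.eq_iff_iff]
  simp [PySem.Set.mem_add]

lemma pvMaster (arr : List Int) (n : Int) (l : List Int)
    (hl : ∀ i ∈ l, 0 ≤ i ∧ i < (arr.length : Int))
    (c : List Int) (used : PySem.Set Int) (total : Int)
    (hmem : ∀ x : Int, used.contains x = c.contains x)
    (hsum : total = c.sum) :
    (l.foldl (pvStepB arr n) (used, total)).2 = (l.foldl (pvStepA arr n) c).sum := by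
  induction l generalizing c used total with
  | nil => simpa using hsum
  | cons i t ih =>
    have hi := hl i (by simp)
    rw [List.foldl_cons, List.foldl_cons]
    rw [pvStepB]
    simp only [PySem.Set.contains] at *
    rw [hmem i]
    by_cases hci : c.contains i = true
    · rw [if_pos hci, pvStepA, if_pos hci]
      exact ih (fun j hj => hl j (by simp [hj])) c used total hmem hsum
    · replace hci : c.contains i = false := by simpa using hci
      rw [if_neg (by simp only [hci]; simp)]
      rw [pvFind_eq arr n i c used hi.1 hi.2 hmem]
      rw [pvStepA, if_neg (by simp only [hci]; simp)]
      cases hf : pvFindA arr n c i with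
      | none =>
        exact ih (fun j hj => hl j (by simp [hj])) c used total hmem hsum
      | some j =>
        have hmem' : ∀ x : Int,
            List.contains (PySem.Set.add (PySem.Set.add used i) j) x = (c ++ [i, j]).contains x := by
          intro x
          rw [pvContains_add, pvContains_add, hmem x, Bool.eq_iff_iff]
          simp
          tauto
        have hsum' : total + i + j = (c ++ [i, j]).sum := by
          simp [hsum]; ring
        exact ih (fun j hj => hl j (by simp [hj])) _ _ _ hmem' hsum'

-- ===== VERDICT (by name: the statement is the Claim_ definition above) =====
theorem pairwise2_spec : Claim_equal_pairwise2 := by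
  intro arr n _
  unfold Spec_pairwise2
  rw [pvA_eq]
  have hb : pairwise2_alt arr n =
      ((PySem.List.pyRange 0 ((arr.length : Int) - 1)).foldl (pvStepB arr n)
        (PySem.Set.empty, 0)).2 := rfl
  rw [hb]
  rw [pvMaster arr n _
    (fun i hi => by
      have := PySem.List.mem_pyRange_one.mp hi
      exact ⟨this.1, by omega⟩)
    [] PySem.Set.empty 0
    (fun x => by simp [PySem.Set.empty])
    rfl]
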